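-- pv_equiv track=rewrite | github.com/east301/dagger | bench/bench.py | otherchildren
-- ===== SOURCE A (Python) =====
-- def children(p, width):
--     """Return list of child ids for parent id p."""
--     i0 = (p + 1) * width
--     i1 = i0 + width
--     return range(i0, i1)
--
-- def otherchildren(p, levels, width):
--     existing = children(p, width)
--
--     pseries = [
--         sum([width**i for i in range(1, lev + 1)])
--         for lev in range(1, levels + 1)
--     ]
--
--     lev = 1
--     # Find level node p is in.
--     for z in pseries:
--         if p < z:
--             break
--         lev += 1
--
--     if lev >= len(pseries):
--         return []
--
--     # Choose other children.
--     out = []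
--     for i in range(pseries[lev - 1], pseries[lev]):
--         if i not in existing:
--             out.append(i)
--
--     return out
-- ===== SOURCE B (Python) =====
-- def otherchildren(p, levels, width):
--     ps = []
--     acc, t = 0, 1
--     for _ in range(levels):
--         t *= width
--         acc += t
--         ps.append(acc)
--     lev = next((k + 1 for k, z in enumerate(ps) if p < z), levels + 1)
--     if lev >= levels:
--         return []
--     start, end = ps[lev - 1], ps[lev]
--     lo = (p + 1) * width
--     hi = lo + width
--     return list(range(start, min(end, lo))) + list(range(max(start, hi), end))
-- ===== Notes on version B (the rewrite author's own statement) =====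
-- stated objective: alternative
-- what changed: B builds the cumulative level boundaries in one running-product pass instead of A's nested per-level power sums, locates the level with a single first-index scan, and replaces A's per-element membership filter over the level interval with closed-form interval arithmetic: two range slices around p's contiguous child block.
import Mathlib
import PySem

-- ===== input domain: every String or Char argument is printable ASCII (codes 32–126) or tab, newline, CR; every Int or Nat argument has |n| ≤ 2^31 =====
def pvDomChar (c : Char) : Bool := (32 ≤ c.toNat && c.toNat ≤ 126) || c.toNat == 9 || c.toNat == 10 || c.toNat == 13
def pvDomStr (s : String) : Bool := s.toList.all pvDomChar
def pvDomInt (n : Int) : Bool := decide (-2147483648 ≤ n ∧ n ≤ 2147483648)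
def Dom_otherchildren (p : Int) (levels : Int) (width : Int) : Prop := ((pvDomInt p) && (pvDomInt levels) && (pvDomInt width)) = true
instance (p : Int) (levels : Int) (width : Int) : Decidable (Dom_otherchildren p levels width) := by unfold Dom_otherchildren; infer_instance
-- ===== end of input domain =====

-- B replaces A's nested per-level power sums by one cumulative pass and A's per-element
-- membership filter by closed-form interval arithmetic: same return value by a different route.

-- ===== PORT A =====
-- the 'for z in pseries / if p < z: break / lev += 1' loop of A
def pvFindLev (p : Int) : List Int → Int → Int
  | [], lev => lev
  | z :: zs, lev => if p < z then lev else pvFindLev p zs (lev + 1)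

def otherchildren (p : Int) (levels : Int) (width : Int) : List Int :=
  -- children(p, width) is range(i0, i1); kept as its bounds: 'i in existing' is i0 ≤ i < i1
  -- (exact Python range membership for step 1)
  let i0 := (p + 1) * width
  let i1 := i0 + width
  -- width**i with i ≥ 1 drawn from range(1, lev+1): exponent is nonnegative, so ^ i.toNat is exact
  let pseries := (PySem.List.pyRange 1 (levels + 1)).map
    (fun lev => ((PySem.List.pyRange 1 (lev + 1)).map (fun i => width ^ i.toNat)).sum)
  let lev := pvFindLev p pseries 1
  if (pseries.length : Int) ≤ lev then []
  else
    -- pseries[lev-1], pseries[lev]: both indices are in range on this branch (1 ≤ lev < len),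
    -- so the .getD 0 default is never used
    let s := (PySem.List.pyGet? pseries (lev - 1)).getD 0
    let e := (PySem.List.pyGet? pseries lev).getD 0
    (PySem.List.pyRange s e).foldl
      (fun out i => if ¬(i0 ≤ i ∧ i < i1) then out ++ [i] else out) []

-- ===== PORT B =====
-- the accumulation loop of Source B: 't *= width; acc += t; ps.append(acc)', repeated n times
def pvBuildPs (width : Int) : Nat → Int → Int → List Int
  | 0, _, _ => []
  | n + 1, acc, t => (acc + t * width) :: pvBuildPs width n (acc + t * width) (t * width)

def otherchildren_alt (p : Int) (levels : Int) (width : Int) : List Int :=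
  let ps := pvBuildPs width levels.toNat 0 1
  -- next((k+1 for k, z in enumerate(ps) if p < z), levels + 1)
  let lev : Int := match ps.findIdx? (fun z => p < z) with
    | some k => (k : Int) + 1
    | none => levels + 1
  if levels ≤ lev then []
  else
    -- ps[lev-1], ps[lev]: in range on this branch, the .getD 0 default is never used
    let s := (PySem.List.pyGet? ps (lev - 1)).getD 0
    let e := (PySem.List.pyGet? ps lev).getD 0
    let lo := (p + 1) * width
    let hi := lo + width
    PySem.List.pyRange s (min e lo) ++ PySem.List.pyRange (max s hi) e

-- ===== PRECONDITION & SPEC =====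
def Spec_otherchildren (p : Int) (levels : Int) (width : Int) (out : List Int) : Prop := out = otherchildren_alt p levels width
instance (p : Int) (levels : Int) (width : Int) (out : List Int) : Decidable (Spec_otherchildren p levels width out) := by unfold Spec_otherchildren; infer_instance

-- ===== CLAIM (what is proved, stated in full; the proofs are below) =====
def Claim_equal_otherchildren : Prop := ∀ (p : Int) (levels : Int) (width : Int), Dom_otherchildren p levels width → Spec_otherchildren p levels width (otherchildren p levels width)

-- ===== LEMMAS AND PROOFS =====

-- sum of width^1 + … + width^m, the value pseries holds per level
def pvS (w : Int) (m : Nat) : Int := ((List.range m).map (fun i => w ^ (i + 1))).sum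

lemma pvS_succ (w : Int) (m : Nat) : pvS w (m + 1) = w + w * pvS w m := by
  unfold pvS
  rw [List.range_succ_eq_map, List.map_cons, List.map_map, List.sum_cons]
  have : (List.range m).map ((fun i => w ^ (i + 1)) ∘ Nat.succ)
       = (List.range m).map (fun i => w * w ^ (i + 1)) := by
    refine List.map_congr_left ?_
    intro i _
    simp [Function.comp, pow_succ]
    ring
  rw [this, ← List.sum_map_mul_left]
  ring_nf

lemma pvBuildPs_eq (w : Int) : ∀ (n : Nat) (acc t : Int),
    pvBuildPs w n acc t = (List.range n).map (fun j => acc + t * pvS w (j + 1)) := by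
  intro n
  induction n with
  | zero => intro acc t; simp [pvBuildPs]
  | succ n ih =>
    intro acc t
    rw [List.range_succ_eq_map, List.map_cons, List.map_map]
    show pvBuildPs w (n + 1) acc t = (acc + t * pvS w 1) :: _
    rw [pvBuildPs, ih]
    congr 1
    · simp [pvS]
    · refine List.map_congr_left ?_
      intro j _
      simp only [Function.comp]
      rw [pvS_succ w (j + 1)]
      ring

lemma pvPyRange_from_one (L : Int) (h : 0 ≤ L) :
    PySem.List.pyRange 1 (L + 1) = (List.range L.toNat).map (fun k : Nat => (1 : Int) + (k : Int)) := by
  simp only [PySem.List.pyRange]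
  rw [if_neg (by norm_num : (1 : Int) ≠ 0), if_pos (by norm_num : (0 : Int) < 1)]
  by_cases hL : (1 : Int) < L + 1
  · rw [if_pos hL]
    have hc : ((L + 1 - 1 + 1 - 1) / 1).toNat = L.toNat := by omega
    rw [hc]
    refine List.map_congr_left ?_
    intro k _
    ring
  · rw [if_neg hL]
    have : L.toNat = 0 := by omega
    simp [this]

lemma pvFindLev_eq (p : Int) : ∀ (zs : List Int) (k : Int),
    pvFindLev p zs k = (match zs.findIdx? (fun z => p < z) with
      | some j => k + (j : Int)
      | none => k + (zs.length : Int)) := by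
  intro zs
  induction zs with
  | nil => intro k; simp [pvFindLev, List.findIdx?_nil]
  | cons z zs ih =>
    intro k
    rw [pvFindLev, List.findIdx?_cons]
    by_cases hz : p < z
    · simp [hz]
    · simp only [hz, decide_false, if_neg, Bool.false_eq_true, not_false_iff]
      rw [ih (k + 1)]
      cases hfi : zs.findIdx? (fun z => p < z) with
      | none => simp [List.length_cons]; ring
      | some j => simp; ring

-- the element found by findIdx? is in range and satisfies the predicate
lemma pvFindIdx?_some {α : Type} (f : α → Bool) : ∀ (l : List α) (k : Nat),
    l.findIdx? f = some k → ∃ h : k < l.length, f (l.get ⟨k, h⟩) = true := by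
  intro l
  induction l with
  | nil => intro k h; simp [List.findIdx?_nil] at h
  | cons x l ih =>
    intro k h
    rw [List.findIdx?_cons] at h
    by_cases hx : f x = true
    · rw [if_pos hx] at h
      cases h
      exact ⟨by simp, hx⟩
    · rw [if_neg hx] at h
      cases k with
      | zero => simp at h
      | succ k =>
        have : l.findIdx? f = some k := by
          cases hfi : l.findIdx? f with
          | none => rw [hfi] at h; simp at h
          | some j => rw [hfi] at h; simp at h; rw [h]
        obtain ⟨hk, hf⟩ := ih k this
        exact ⟨by simp; omega, hf⟩

-- A's append loop, as a filter
lemma pvLoopA_eq_filter (lo hi : Int) : ∀ (l : List Int) (acc : List Int),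
    l.foldl (fun out i => if ¬(lo ≤ i ∧ i < hi) then out ++ [i] else out) acc =
    acc ++ l.filter (fun i => decide ¬(lo ≤ i ∧ i < hi)) := by
  intro l
  induction l with
  | nil => intro acc; simp
  | cons x l ih =>
    intro acc
    rw [List.foldl_cons, List.filter_cons]
    by_cases hx : ¬(lo ≤ x ∧ x < hi)
    · rw [if_pos hx, ih, decide_eq_true hx]
      simp
    · rw [if_neg hx, ih, decide_eq_false hx]
      simp

-- the interval split equals the filter whenever the removed block [lo,hi) is a genuine interval
lemma pvFilter_split (lo hi : Int) (hle : lo ≤ hi) : ∀ (n : Nat) (s e : Int), (e - s).toNat = n →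
    (PySem.List.pyRange s e).filter (fun i => decide ¬(lo ≤ i ∧ i < hi)) =
    PySem.List.pyRange s (min e lo) ++ PySem.List.pyRange (max s hi) e := by
  intro n
  induction n with
  | zero =>
    intro s e he
    have h1 : e ≤ s := by omega
    rw [PySem.List.pyRange_one_eq_nil h1,
        PySem.List.pyRange_one_eq_nil (show (min e lo) ≤ s by omega),
        PySem.List.pyRange_one_eq_nil (show e ≤ max s hi by omega)]
    simp
  | succ n ih =>
    intro s e he
    have hse : s < e := by omega
    rw [PySem.List.pyRange_one_cons hse, List.filter_cons]
    have ihe := ih (s + 1) e (by omega)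
    by_cases h1 : s < lo
    · have : (decide ¬(lo ≤ s ∧ s < hi)) = true := by simp; omega
      rw [this, if_pos rfl, ihe,
          PySem.List.pyRange_one_cons (show s < min e lo by omega)]
      have : max (s + 1) hi = max s hi := by omega
      simp [this]
    · by_cases h2 : s < hi
      · -- lo ≤ s < hi : s is a child, dropped
        have : (decide ¬(lo ≤ s ∧ s < hi)) = false := by simp; omega
        rw [this, if_neg (by simp), ihe,
            PySem.List.pyRange_one_eq_nil (show (min e lo) ≤ s + 1 by omega),
            PySem.List.pyRange_one_eq_nil (show (min e lo) ≤ s by omega)]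
        have : max (s + 1) hi = max s hi := by omega
        simp [this]
      · -- hi ≤ s : past the child block, kept
        have : (decide ¬(lo ≤ s ∧ s < hi)) = true := by simp; omega
        rw [this, if_pos rfl, ihe,
            PySem.List.pyRange_one_eq_nil (show (min e lo) ≤ s + 1 by omega),
            PySem.List.pyRange_one_eq_nil (show (min e lo) ≤ s by omega)]
        have hm1 : max (s + 1) hi = s + 1 := by omega
        have hm2 : max s hi = s := by omega
        rw [hm1, hm2, PySem.List.pyRange_one_cons hse]
        simp

-- A's pseries, rewritten to the canonical per-level form shared with B
lemma pvPseriesA_eq (width levels : Int) (h : 0 ≤ levels) :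
    (PySem.List.pyRange 1 (levels + 1)).map
      (fun lev => ((PySem.List.pyRange 1 (lev + 1)).map (fun i => width ^ i.toNat)).sum)
    = (List.range levels.toNat).map (fun j => pvS width (j + 1)) := by
  rw [pvPyRange_from_one levels h, List.map_map]
  refine List.map_congr_left ?_
  intro k _
  simp only [Function.comp]
  rw [pvPyRange_from_one ((1 : Int) + k) (by positivity), List.map_map]
  have hlen : ((1 : Int) + k).toNat = k + 1 := by omega
  rw [hlen]
  unfold pvS
  refine congrArg List.sum (List.map_congr_left ?_)
  intro i _
  simp only [Function.comp]
  congr 1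
  omega

-- ===== VERDICT (by name: the statement is the Claim_ definition above) =====
theorem otherchildren_spec : Claim_equal_otherchildren := by
  intro p levels width _
  unfold Spec_otherchildren otherchildren otherchildren_alt
  by_cases hneg : levels < 0
  · -- both pseries are empty: A's lev is 1 ≥ 0 = length, B's condition levels ≤ levels + 1 holds
    have hA : PySem.List.pyRange 1 (levels + 1) = [] := PySem.List.pyRange_one_eq_nil (by omega)
    have hB : levels.toNat = 0 := by omega
    rw [hA, hB]
    simp [pvBuildPs, pvFindLev, List.findIdx?_nil]
  · have h0 : (0 : Int) ≤ levels := by omega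
    have hA := pvPseriesA_eq width levels h0
    have hB := pvBuildPs_eq width levels.toNat 0 1
    simp only [zero_add, one_mul] at hB
    rw [hA, hB]
    set ps := (List.range levels.toNat).map (fun j => pvS width (j + 1)) with hps
    have hlen : ps.length = levels.toNat := by simp [hps]
    have hlev : pvFindLev p ps 1 = (match ps.findIdx? (fun z => p < z) with
        | some k => (k : Int) + 1
        | none => levels + 1) := by
      rw [pvFindLev_eq]
      cases hfi : ps.findIdx? (fun z => p < z) with
      | none =>
        show (1 : Int) + (ps.length : Int) = levels + 1
        rw [hlen]; omega
      | some k =>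
        show (1 : Int) + (k : Int) = (k : Int) + 1
        ring
    dsimp only
    rw [hlev]
    cases hfi : ps.findIdx? (fun z => p < z) with
    | none =>
      -- lev = levels + 1 on both sides; both conditions hold
      dsimp only
      have c1 : ((ps.length : Int)) ≤ levels + 1 := by rw [hlen]; omega
      have c2 : levels ≤ levels + 1 := by omega
      rw [if_pos c1, if_pos c2]
    | some k =>
      dsimp only
      obtain ⟨hk, hpk⟩ := pvFindIdx?_some (fun z => p < z) ps k hfi
      have hklen : k < levels.toNat := by omega
      by_cases hc : levels ≤ (k : Int) + 1
      · have c1 : ((ps.length : Int)) ≤ (k : Int) + 1 := by rw [hlen]; omega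
        rw [if_pos c1, if_pos hc]
      · have c1 : ¬ ((ps.length : Int)) ≤ (k : Int) + 1 := by rw [hlen]; omega
        rw [if_neg c1, if_neg hc]
        -- 1 ≤ lev = k+1 < levels: both indices in range, s and e are pvS values
        have hk1 : k + 1 < levels.toNat := by omega
        have hs : (PySem.List.pyGet? ps ((k : Int) + 1 - 1)).getD 0 = pvS width (k + 1) := by
          have : ((k : Int) + 1 - 1) = (k : Int) := by ring
          rw [this, PySem.List.pyGet?_natCast]
          simp [hps, hklen]
        have he : (PySem.List.pyGet? ps ((k : Int) + 1)).getD 0 = pvS width (k + 2) := by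
          have : ((k : Int) + 1) = ((k + 1 : Nat) : Int) := by push_cast; ring
          rw [this, PySem.List.pyGet?_natCast]
          simp [hps, hk1]
        rw [hs, he, pvLoopA_eq_filter _ _ _ [], List.nil_append]
        set lo := (p + 1) * width with hlo
        set hi := lo + width with hhi
        set s := pvS width (k + 1) with hsdef
        set e := pvS width (k + 2) with hedef
        by_cases hw : 0 ≤ width
        · exact pvFilter_split lo hi (show lo ≤ hi by omega) (e - s).toNat s e rfl
        · -- width < 0: the child block lies at or past the interval end, so nothing is removed
          have hps' : ps.get ⟨k, hk⟩ = s := by rw [hsdef]; simp [hps]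
          have hpls : p < s := by
            have := hpk
            rw [hps'] at this
            simpa using this
          have hes : e = width + width * s := by
            rw [hedef, hsdef]
            exact pvS_succ width (k + 1)
          have hehi : e ≤ hi := by
            -- e - hi = width * (s - 1 - p) ≤ 0
            have h1 : e - hi = width * (s - 1 - p) := by rw [hes, hhi, hlo]; ring
            have h2 : width * (s - 1 - p) ≤ 0 :=
              mul_nonpos_of_nonpos_of_nonneg (by omega) (by omega)
            omega
          have hhilo : hi < lo := by rw [hhi]; omega
          rw [List.filter_eq_self.mpr (by intro i _; simp; omega),
              min_eq_left (by omega),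
              PySem.List.pyRange_one_eq_nil (show e ≤ max s hi by omega)]
          simp
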